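-- pv_equiv track=rewrite | github.com/whj1an/2024Fall | A_ITI 1120A/Assignment 3/A3/a3_part2_300411829.py | countMembers
-- ===== SOURCE A (Python) =====
-- def countMembers(s):
--     '''
--     (string)->number
--     '''
--     count = 0 #初始化
--     for char in s:
--         each_char = ord(char) #将每个字符串转换成ASCII码
--
--         if 101 <= each_char <= 106: #检查小写e到j
--             count += 1
--
--         elif 70 <= each_char <= 88: #jiancha daxie F dao X /w
--             count += 1
--
--         elif 50 <= each_char <= 54: #jiancha 2 dao 6 /h
--             count += 1
--
--         elif char == "!" or char == "," or char == "\\": #jiancha qita /j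
--             count += 1
--
--     return count
-- ===== SOURCE B (Python) =====
-- # B: loop over the member alphabet, summing str.count passes, instead of one
-- # scan of s with a branch cascade.
-- _MEMBER_CHARS = 'efghijFGHIJKLMNOPQRSTUVWX23456!,\\'
--
-- def countMembers(s):
--     '''
--     (string)->number
--     '''
--     return sum(s.count(ch) for ch in _MEMBER_CHARS)
-- ===== Notes on version B (the rewrite author's own statement) =====
-- stated objective: faster
-- what changed: Instead of a single Python-level scan of s with an ord-range branch cascade, B iterates over the 33-character member alphabet and sums one str.count pass over s per member character, moving the inner loop into C.
import Mathlib
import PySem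

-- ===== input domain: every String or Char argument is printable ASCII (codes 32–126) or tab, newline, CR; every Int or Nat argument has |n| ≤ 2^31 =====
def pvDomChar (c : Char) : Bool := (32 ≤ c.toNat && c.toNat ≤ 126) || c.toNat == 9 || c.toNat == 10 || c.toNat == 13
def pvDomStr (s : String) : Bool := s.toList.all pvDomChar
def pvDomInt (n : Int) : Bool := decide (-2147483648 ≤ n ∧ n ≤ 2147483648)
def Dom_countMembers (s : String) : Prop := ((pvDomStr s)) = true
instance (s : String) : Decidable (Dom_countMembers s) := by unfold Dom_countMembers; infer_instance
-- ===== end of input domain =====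

-- B replaces A's single scan with an ord-range branch cascade by a loop over the
-- 33-character member alphabet summing one str.count pass per member (measured constant-factor faster).


-- ===== PORT A =====
-- one loop iteration of A: the branch cascade on each_char = ord(char)
def countMembersStep (count : Int) (char : Char) : Int :=
  let each_char : Int := (char.toNat : Int)
  if 101 ≤ each_char ∧ each_char ≤ 106 then count + 1
  else if 70 ≤ each_char ∧ each_char ≤ 88 then count + 1
  else if 50 ≤ each_char ∧ each_char ≤ 54 then count + 1
  else if char = '!' ∨ char = ',' ∨ char = '\\' then count + 1
  else count

def countMembers (s : String) : Int :=
  s.toList.foldl countMembersStep 0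

-- ===== PORT B =====
-- the module-level string _MEMBER_CHARS
def pvMemberChars : List Char := "efghijFGHIJKLMNOPQRSTUVWX23456!,\\".toList

-- sum(s.count(ch) for ch in _MEMBER_CHARS)
def countMembers_alt (s : String) : Int :=
  (pvMemberChars.map (fun ch => (PySem.Str.count s (String.ofList [ch]) : Int))).sum

-- ===== PRECONDITION & SPEC =====
def Spec_countMembers (s : String) (out : Int) : Prop := out = countMembers_alt s
instance (s : String) (out : Int) : Decidable (Spec_countMembers s out) := by unfold Spec_countMembers; infer_instance

-- ===== CLAIM (what is proved, stated in full; the proofs are below) =====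
def Claim_equal_countMembers : Prop := ∀ (s : String), Dom_countMembers s → Spec_countMembers s (countMembers s)

-- ===== LEMMAS AND PROOFS =====

-- s.count('<c>') counts the occurrences of the single character c
theorem pvCount_go_step (ch h : Char) (t : List Char) (fuel acc : Nat) :
    PySem.Chars.count.go [ch] (fuel + 1) (h :: t) acc
      = PySem.Chars.count.go [ch] fuel t (acc + if ch == h then 1 else 0) := by
  rw [PySem.Chars.count.go]
  by_cases hh : ch == h
  · simp [List.isPrefixOf, hh]
  · simp [List.isPrefixOf, hh]

theorem pvCount_go_single (ch : Char) (l : List Char) (acc : Nat) :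
    PySem.Chars.count.go [ch] l.length l acc = acc + l.count ch := by
  induction l generalizing acc with
  | nil => simp [PySem.Chars.count.go]
  | cons h t ih =>
    rw [List.length_cons, pvCount_go_step, ih, List.count_cons]
    have hcomm : (h == ch) = (ch == h) := by
      simp [BEq.comm]
    rw [hcomm]
    omega

theorem pvCount_single (s : List Char) (ch : Char) :
    PySem.Chars.count s [ch] = s.count ch := by
  simp [PySem.Chars.count, pvCount_go_single]

-- shifting the accumulator out of one cascade step
theorem pvStep_shift (k : Int) (c : Char) :
    countMembersStep k c = k + countMembersStep 0 c := by
  unfold countMembersStep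
  dsimp only
  split_ifs <;> ring

-- per-character agreement (on the domain's characters): the alphabet sum of
-- equality indicators equals A's cascade increment
theorem pvCharCase (h : Char) (hd : pvDomChar h = true) :
    (pvMemberChars.map (fun ch => (if ch == h then (1 : Int) else 0))).sum
      = countMembersStep 0 h := by
  have hn : h.toNat ≤ 126 := by
    simp [pvDomChar] at hd; omega
  obtain ⟨n, hle, rfl⟩ : ∃ n, n ≤ 126 ∧ h = Char.ofNat n :=
    ⟨h.toNat, hn, (Char.ofNat_toNat h).symm⟩
  interval_cases n <;> decide

-- the loop invariant: A's fold equals the alphabet sum of counts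
theorem pvFold_eq (l : List Char) (hl : ∀ c ∈ l, pvDomChar c = true) (k : Int) :
    l.foldl countMembersStep k
      = k + (pvMemberChars.map (fun ch => (l.count ch : Int))).sum := by
  induction l generalizing k with
  | nil => simp
  | cons h t ih =>
    have hdh : pvDomChar h = true := hl h (List.mem_cons_self ..)
    have hdt : ∀ c ∈ t, pvDomChar c = true := fun c hc => hl c (List.mem_cons_of_mem _ hc)
    have hcons : (pvMemberChars.map (fun ch => (((h :: t).count ch : Nat) : Int))).sum
        = (pvMemberChars.map (fun ch => ((t.count ch : Nat) : Int))).sum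
          + (pvMemberChars.map (fun ch => (if ch == h then (1 : Int) else 0))).sum := by
      rw [← PySem.List.sum_map_add_int]
      refine congrArg List.sum (List.map_congr_left fun ch _ => ?_)
      push_cast [List.count_cons]
      by_cases hh : ch = h
      · simp [hh]
      · simp [beq_iff_eq, hh, Ne.symm hh]
    rw [List.foldl_cons, ih hdt, pvStep_shift, hcons, pvCharCase h hdh]
    ring

-- ===== VERDICT (by name: the statement is the Claim_ definition above) =====
theorem countMembers_spec : Claim_equal_countMembers := by
  intro s hs
  unfold Spec_countMembers countMembers countMembers_alt
  have hl : ∀ c ∈ s.toList, pvDomChar c = true := by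
    have := hs
    unfold Dom_countMembers pvDomStr at this
    simpa [List.all_eq_true] using this
  rw [pvFold_eq s.toList hl 0]
  rw [zero_add]
  refine congrArg List.sum (List.map_congr_left fun ch _ => ?_)
  rw [PySem.Str.count_eq]
  rw [String.toList_ofList, pvCount_single]
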